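-- pv_equiv track=rewrite | github.com/viggi-v/sdc | script/robdd.py | getIndicesFromCube
-- ===== SOURCE A (Python) =====
-- def makeCubes(arr):
--     return [int(arr[i]) * 2 - 1 + int(arr[i + 1]) for i in range(0, len(arr) - 1, 2)]
--
-- def getIndicesFromCube(cube):
--     cube = makeCubes(cube)
--     index = [0]
--     for num in cube:
--         if (num != 2):
--             index = [ind * 2 + num for ind in index]
--         else:
--             index = [ind * 2 for ind in index] + [ind * 2 + 1 for ind in index]
--     return index
-- ===== SOURCE B (Python) =====
-- def _weighted(digits):
--     # sum(digits[p] << (len(digits)-1-p)) by divide and conquer (shift-and-add)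
--     if len(digits) == 0:
--         return 0
--     if len(digits) == 1:
--         return digits[0]
--     m = len(digits) // 2
--     return (_weighted(digits[:m]) << (len(digits) - m)) + _weighted(digits[m:])
--
-- def getIndicesFromCube(cube):
--     nums = [int(cube[i]) * 2 - 1 + int(cube[i + 1]) for i in range(0, len(cube) - 1, 2)]
--     n = len(nums)
--     base = _weighted([0 if num == 2 else num for num in nums])
--     weights = [1 << (n - 1 - p) for p, num in enumerate(nums) if num == 2]
--     return [base + sum(w for i, w in enumerate(weights) if (j >> i) & 1)
--             for j in range(1 << len(weights))]
-- ===== Notes on version B (the rewrite author's own statement) =====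
-- stated objective: faster
-- what changed: Instead of rebuilding the whole index list at every cube position (A maps/doubles a list of ever-growing big integers n times), B computes the fixed-bit base value once by divide-and-conquer shift-and-add, collects the don't-care bit weights, and emits each output directly from its combination number's bits.
import Mathlib
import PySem

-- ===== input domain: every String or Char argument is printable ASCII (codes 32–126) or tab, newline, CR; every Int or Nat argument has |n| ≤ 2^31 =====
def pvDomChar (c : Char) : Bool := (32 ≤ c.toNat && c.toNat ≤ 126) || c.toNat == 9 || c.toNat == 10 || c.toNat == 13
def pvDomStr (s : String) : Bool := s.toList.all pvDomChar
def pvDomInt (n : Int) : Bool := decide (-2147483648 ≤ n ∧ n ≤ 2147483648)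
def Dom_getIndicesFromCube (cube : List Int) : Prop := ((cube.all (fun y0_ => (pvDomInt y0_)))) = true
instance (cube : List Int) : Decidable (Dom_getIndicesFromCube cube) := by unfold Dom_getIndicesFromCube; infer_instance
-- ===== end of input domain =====

-- B replaces A's repeated rebuilding of the whole index list at every cube position by a
-- closed-form enumeration: one pass computes the base value and the don't-care bit weights,
-- then each output element is produced directly from its combination number.

-- ===== PORT A =====
-- indices i and i+1 produced by range(0, len-1, 2) are always in range, so pyGetD's default is never used
def makeCubesA (arr : List Int) : List Int :=
  (PySem.List.pyRange 0 ((arr.length : Int) - 1) 2).map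
    (fun i => PySem.List.pyGetD arr i 0 * 2 - 1 + PySem.List.pyGetD arr (i + 1) 0)

def getIndicesFromCube (cube : List Int) : List Int :=
  let cube := makeCubesA cube
  cube.foldl
    (fun index num =>
      if num ≠ 2 then index.map (fun ind => ind * 2 + num)
      else index.map (fun ind => ind * 2) ++ index.map (fun ind => ind * 2 + 1))
    [0]

-- ===== PORT B =====
-- same pair decoding as the module helper makeCubes (indices always in range)
def makeCubesB (arr : List Int) : List Int :=
  (PySem.List.pyRange 0 ((arr.length : Int) - 1) 2).map
    (fun i => PySem.List.pyGetD arr i 0 * 2 - 1 + PySem.List.pyGetD arr (i + 1) 0)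

def pvWeighted (d : List Int) : Int :=
  if d.length = 0 then 0
  else if d.length = 1 then PySem.List.pyGetD d 0 0
  else
    let m := d.length / 2
    -- Python's '<< (len - m)' is multiplication by 2 ^ (len - m)
    pvWeighted (d.take m) * 2 ^ (d.length - m) + pvWeighted (d.drop m)
termination_by d.length
decreasing_by
  · simp only [List.length_take]; omega
  · simp only [List.length_drop]; omega

def getIndicesFromCube_alt (cube : List Int) : List Int :=
  let nums := makeCubesB cube
  let n := nums.length
  let base := pvWeighted (nums.map (fun num => if num = 2 then 0 else num))
  -- [1 << (n-1-p) for p, num in enumerate(nums) if num == 2]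
  let weights :=
    (nums.zipIdx.filter (fun x => x.1 == 2)).map (fun x => (2 : Int) ^ (n - 1 - x.2))
  (List.range (2 ^ weights.length)).map
    (fun j =>
      base + weights.zipIdx.foldl
        (fun s wi => if (j >>> wi.2) % 2 = 1 then s + wi.1 else s) 0)

-- ===== PRECONDITION & SPEC =====
def Spec_getIndicesFromCube (cube : List Int) (out : List Int) : Prop := out = getIndicesFromCube_alt cube
instance (cube : List Int) (out : List Int) : Decidable (Spec_getIndicesFromCube cube out) := by unfold Spec_getIndicesFromCube; infer_instance

-- ===== CLAIM (what is proved, stated in full; the proofs are below) =====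
def Claim_equal_getIndicesFromCube : Prop := ∀ (cube : List Int), Dom_getIndicesFromCube cube → Spec_getIndicesFromCube cube (getIndicesFromCube cube)

-- ===== LEMMAS AND PROOFS =====

-- A's loop step
def pvStepA (index : List Int) (num : Int) : List Int :=
  if num ≠ 2 then index.map (fun ind => ind * 2 + num)
  else index.map (fun ind => ind * 2) ++ index.map (fun ind => ind * 2 + 1)

-- abstract value list of A's loop started from [0]
def pvV : List Int → List Int
  | [] => [0]
  | num :: rest =>
      let w : Int := 2 ^ rest.length
      if num ≠ 2 then (pvV rest).map (fun v => v + num * w)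
      else (pvV rest).flatMap (fun v => [v, v + w])

-- right-recursive base/weights
def pvBW : List Int → Int × List Int
  | [] => (0, [])
  | num :: rest =>
      let w : Int := 2 ^ rest.length
      let bw := pvBW rest
      if num ≠ 2 then (bw.1 + num * w, bw.2) else (bw.1, w :: bw.2)

-- sum of weights selected by the bits of j
def pvSB : Nat → List Int → Int
  | _, [] => 0
  | j, w :: ws => (if j % 2 = 1 then w else 0) + pvSB (j / 2) ws

theorem pvStepA_foldl (nums : List Int) :
    ∀ idx : List Int,
      nums.foldl pvStepA idx
        = (pvV nums).flatMap (fun v => idx.map (fun x => x * 2 ^ nums.length + v)) := by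
  induction nums with
  | nil =>
      intro idx
      simp [pvV]
  | cons num rest ih =>
      intro idx
      by_cases h : num = 2
      · subst h
        rw [List.foldl_cons]
        have hs : pvStepA idx 2
            = idx.map (fun ind => ind * 2) ++ idx.map (fun ind => ind * 2 + 1) := by
          simp [pvStepA]
        rw [hs, ih]
        simp only [pvV, if_neg (by simp : ¬ ((2 : Int) ≠ 2)), List.flatMap_assoc,
          List.length_cons]
        apply List.flatMap_congr
        intro v _
        simp only [List.map_append, List.map_map, List.flatMap_cons, List.flatMap_nil,
          List.append_nil]
        congr 1
        · apply List.map_congr_left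
          intro x _
          simp only [Function.comp]
          ring
        · apply List.map_congr_left
          intro x _
          simp only [Function.comp]
          ring
      · rw [List.foldl_cons]
        have hs : pvStepA idx num = idx.map (fun ind => ind * 2 + num) := by
          simp [pvStepA, h]
        rw [hs, ih]
        simp only [pvV, if_pos h, List.length_cons, List.flatMap_map]
        apply List.flatMap_congr
        intro v _
        simp only [List.map_map]
        apply List.map_congr_left
        intro x _
        simp only [Function.comp]
        ring

-- value of a digit list read most-significant-first
def pvH : List Int → Int
  | [] => 0
  | x :: xs => x * 2 ^ xs.length + pvH xs

theorem pvH_append (u v : List Int) :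
    pvH (u ++ v) = pvH u * 2 ^ v.length + pvH v := by
  induction u with
  | nil => simp [pvH]
  | cons x u ih =>
      simp only [List.cons_append, pvH, ih, List.length_append]
      rw [pow_add]
      ring

theorem pvWeighted_eq (d : List Int) : pvWeighted d = pvH d := by
  induction d using pvWeighted.induct with
  | case1 d h =>
      rw [pvWeighted]
      simp only [if_pos h]
      rw [List.length_eq_zero_iff.mp h]
      simp [pvH]
  | case2 d h h1 =>
      rw [pvWeighted]
      simp only [if_neg h, if_pos h1]
      match d, h1 with
      | [x], _ => simp [pvH, PySem.List.pyGetD_zero_cons]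
  | case3 d h h1 m ih1 ih2 =>
      rw [pvWeighted]
      simp only [if_neg h, if_neg h1]
      rw [ih1, ih2]
      conv_rhs => rw [← List.take_append_drop (d.length / 2) d]
      rw [pvH_append, List.length_drop]

theorem pvBase_eq (nums : List Int) :
    pvH (nums.map (fun num => if num = 2 then 0 else num)) = (pvBW nums).1 := by
  induction nums with
  | nil => simp [pvH, pvBW]
  | cons num rest ih =>
      simp only [List.map_cons, pvH, List.length_map, pvBW, ih]
      by_cases h : num = 2
      · subst h; simp
      · simp only [if_neg h, if_pos h]
        ring

theorem pvWeights_eq (n : Nat) :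
    ∀ (l : List Int) (p0 : Nat), p0 + l.length = n →
      ((l.zipIdx p0).filter (fun x => x.1 == 2)).map (fun x => (2 : Int) ^ (n - 1 - x.2))
        = (pvBW l).2 := by
  intro l
  induction l with
  | nil => intro p0 _; simp [pvBW]
  | cons num rest ih =>
      intro p0 hp
      have hw : n - 1 - p0 = rest.length := by
        simp [List.length_cons] at hp
        omega
      rw [List.zipIdx_cons, List.filter_cons]
      by_cases h : num = 2
      · subst h
        simp only [beq_self_eq_true, if_pos]
        rw [List.map_cons, ih (p0 + 1) (by simp [List.length_cons] at hp ⊢; omega), hw]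
        simp [pvBW]
      · have hb : ((num, p0).1 == (2 : Int)) = false := by simpa using h
        simp only [hb, Bool.false_eq_true, if_neg, not_false_eq_true]
        rw [ih (p0 + 1) (by simp [List.length_cons] at hp ⊢; omega)]
        simp [pvBW, h]

theorem pvSB_foldl (j : Nat) :
    ∀ (ws : List Int) (k : Nat) (s0 : Int),
      (ws.zipIdx k).foldl
          (fun s wi => if (j >>> wi.2) % 2 = 1 then s + wi.1 else s) s0
        = s0 + pvSB (j >>> k) ws := by
  intro ws
  induction ws with
  | nil => intro k s0; simp [pvSB]
  | cons w rest ih =>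
      intro k s0
      rw [List.zipIdx_cons, List.foldl_cons]
      have hs : j >>> (k + 1) = (j >>> k) / 2 := by
        rw [Nat.shiftRight_succ]
      by_cases h : (j >>> k) % 2 = 1
      · simp only [if_pos h]
        rw [ih (k + 1) (s0 + w), hs]
        simp [pvSB, h, add_assoc]
      · simp only [if_neg h]
        rw [ih (k + 1) s0, hs]
        simp [pvSB, h]

theorem pvRange_two_mul (N : Nat) :
    List.range (2 * N) = (List.range N).flatMap (fun i => [2 * i, 2 * i + 1]) := by
  induction N with
  | zero => simp
  | succ N ih =>
      have h1 : 2 * (N + 1) = (2 * N + 1) + 1 := by ring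
      rw [h1, List.range_succ, List.range_succ, ih, List.range_succ, List.flatMap_append]
      simp

theorem pvV_eq (nums : List Int) :
    pvV nums
      = (List.range (2 ^ (pvBW nums).2.length)).map
          (fun j => (pvBW nums).1 + pvSB j (pvBW nums).2) := by
  induction nums with
  | nil => simp [pvV, pvBW, pvSB]
  | cons num rest ih =>
      by_cases h : num = 2
      · subst h
        simp only [pvV, pvBW, if_neg (by simp : ¬ ((2 : Int) ≠ 2))]
        rw [ih]
        have hpow : 2 ^ ((pvBW rest).2.length + 1) = 2 * 2 ^ (pvBW rest).2.length := by
          rw [pow_succ]; ring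
        simp only [List.length_cons, hpow, pvRange_two_mul, List.map_flatMap,
          List.flatMap_map]
        apply List.flatMap_congr
        intro i _
        have h0 : (2 * i) % 2 = 0 := by omega
        have h0' : (2 * i) / 2 = i := by omega
        have h1 : (2 * i + 1) % 2 = 1 := by omega
        have h1' : (2 * i + 1) / 2 = i := by omega
        simp only [List.map_cons, List.map_nil, pvSB, h0, h0', h1, h1']
        norm_num
        ring
      · simp only [pvV, pvBW, if_pos h]
        rw [ih]
        simp only [List.map_map]
        apply List.map_congr_left
        intro j _
        simp only [Function.comp]
        ring

theorem pvFlatMap_single_map (l : List Int) (g : Int → Int) :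
    l.flatMap (fun v => [g v]) = l.map g := by
  rw [← List.flatMap_singleton' (l.map g), List.flatMap_map]

theorem getIndicesFromCube_spec : Claim_equal_getIndicesFromCube := by
  intro cube _
  unfold Spec_getIndicesFromCube
  show (makeCubesA cube).foldl pvStepA [0] = getIndicesFromCube_alt cube
  rw [pvStepA_foldl]
  simp only [List.map_cons, List.map_nil, zero_mul, zero_add]
  rw [pvFlatMap_single_map, pvV_eq, List.map_id']
  unfold getIndicesFromCube_alt
  have hmb : makeCubesB cube = makeCubesA cube := rfl
  simp only [hmb]
  rw [pvWeighted_eq, pvBase_eq,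
    pvWeights_eq (makeCubesA cube).length (makeCubesA cube) 0 (by simp)]
  simp only [pvSB_foldl, Nat.shiftRight_zero, zero_add]
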